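-- pv_equiv track=rewrite | github.com/arturoornelasb/tibia-bonelord-469-cipher | scripts/analysis/session26_block_decomposition.py | get_extra_letters
-- ===== SOURCE A (Python) =====
-- from collections import Counter, defaultdict
--
-- def get_extra_letters(block, word):
--     """Return the extra letters in block not accounted for by word."""
--     bc = Counter(block)
--     wc = Counter(word)
--     extras = []
--     for ch in bc:
--         diff = bc[ch] - wc.get(ch, 0)
--         extras.extend([ch] * diff)
--     return ''.join(sorted(extras))
-- ===== SOURCE B (Python) =====
-- def get_extra_letters(block, word):
--     """Return the extra letters in block not accounted for by word."""
--     sb = sorted(block)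
--     sw = sorted(word)
--     res = []
--     i = j = 0
--     while i < len(sb):
--         if j >= len(sw):
--             res.append(sb[i])
--             i += 1
--         elif sb[i] == sw[j]:
--             i += 1
--             j += 1
--         elif sw[j] < sb[i]:
--             j += 1
--         else:
--             res.append(sb[i])
--             i += 1
--     return ''.join(res)
-- ===== Notes on version B (the rewrite author's own statement) =====
-- stated objective: alternative
-- what changed: Replaced Counter-based per-character counting followed by a sort of the extras with sorting both strings once and a two-pointer linear merge that emits the multiset difference already in order.
import Mathlib
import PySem

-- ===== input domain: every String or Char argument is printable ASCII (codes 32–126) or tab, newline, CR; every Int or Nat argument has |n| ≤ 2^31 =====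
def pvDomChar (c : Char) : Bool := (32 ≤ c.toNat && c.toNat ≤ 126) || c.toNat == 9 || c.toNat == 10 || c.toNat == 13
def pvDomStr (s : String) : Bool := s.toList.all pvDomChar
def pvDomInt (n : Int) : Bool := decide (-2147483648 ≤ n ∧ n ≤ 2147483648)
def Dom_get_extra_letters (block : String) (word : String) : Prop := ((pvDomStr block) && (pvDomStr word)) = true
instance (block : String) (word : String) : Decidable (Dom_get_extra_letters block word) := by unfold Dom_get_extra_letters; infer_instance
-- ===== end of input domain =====

-- B replaces Counter-based counting with sort-then-linear-merge multiset difference (alternative algorithm, same result).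

-- ===== PORT A =====
def get_extra_letters (block : String) (word : String) : String :=
  let bc := PySem.Dict.counter block.toList
  let wc := PySem.Dict.counter word.toList
  let extras := bc.keys.foldl (fun acc ch =>
    acc ++ List.replicate (bc.getD ch 0 - wc.getD ch 0).toNat ch) []
  String.mk (PySem.List.sorted extras (fun x => x) false)

-- ===== PORT B =====
-- two-pointer walk over the two sorted lists (Source B's while loop as structural recursion)
def pvMerge : List Char → List Char → List Char
  | [], _ => []
  | x :: xs, [] => x :: pvMerge xs []
  | x :: xs, y :: ys =>
    if x = y then pvMerge xs ys
    else if y < x then pvMerge (x :: xs) ys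
    else x :: pvMerge xs (y :: ys)
  termination_by a b => (a.length, b.length)

def get_extra_letters_alt (block : String) (word : String) : String :=
  String.mk (pvMerge (PySem.List.sorted block.toList (fun x => x) false)
                     (PySem.List.sorted word.toList (fun x => x) false))

-- ===== PRECONDITION & SPEC =====
def Spec_get_extra_letters (block : String) (word : String) (out : String) : Prop := out = get_extra_letters_alt block word
instance (block : String) (word : String) (out : String) : Decidable (Spec_get_extra_letters block word out) := by unfold Spec_get_extra_letters; infer_instance

-- ===== CLAIM (what is proved, stated in full; the proofs are below) =====
def Claim_equal_get_extra_letters : Prop := ∀ (block : String) (word : String), Dom_get_extra_letters block word → Spec_get_extra_letters block word (get_extra_letters block word)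

-- ===== LEMMAS AND PROOFS =====

-- pvMerge keeps a subsequence of its first argument
theorem pvMerge_sublist (a b : List Char) : (pvMerge a b).Sublist a := by
  induction a, b using pvMerge.induct with
  | case1 b => simp [pvMerge]
  | case2 x xs ih => simpa [pvMerge] using ih.cons₂ x
  | case3 xs y ys ih => simpa [pvMerge] using ih.cons y
  | case4 x xs y ys h1 h2 ih => simpa [pvMerge, h1, h2] using ih
  | case5 x xs y ys h1 h2 ih => simpa [pvMerge, h1, h2] using ih.cons₂ x

theorem pvMerge_pairwise (a b : List Char) (ha : a.Pairwise (· ≤ ·)) :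
    (pvMerge a b).Pairwise (· ≤ ·) := ha.sublist (pvMerge_sublist a b)

-- on sorted inputs pvMerge computes the truncated multiset difference
theorem count_pvMerge (a b : List Char) (ha : a.Pairwise (· ≤ ·)) (hb : b.Pairwise (· ≤ ·))
    (c : Char) : (pvMerge a b).count c = a.count c - b.count c := by
  induction a, b using pvMerge.induct with
  | case1 b => simp [pvMerge]
  | case2 x xs ih =>
    simp only [pvMerge, List.count_cons]
    rw [ih (List.pairwise_cons.mp ha).2 (by simp)]
    simp
  | case3 xs y ys ih =>
    have he : pvMerge (y :: xs) (y :: ys) = pvMerge xs ys := by simp [pvMerge]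
    rw [he, ih (List.pairwise_cons.mp ha).2 (List.pairwise_cons.mp hb).2, List.count_cons,
      List.count_cons]
    by_cases hc : y = c <;> simp [hc]
  | case4 x xs y ys h1 h2 ih =>
    have he : pvMerge (x :: xs) (y :: ys) = pvMerge (x :: xs) ys := by simp [pvMerge, h1, h2]
    rw [he, ih ha (List.pairwise_cons.mp hb).2]
    by_cases hc : c = y
    · subst hc
      have hc0 : (x :: xs).count c = 0 := by
        rw [List.count_eq_zero]
        intro hmem
        have hle : x ≤ c := by
          rcases List.mem_cons.mp hmem with h | h
          · exact le_of_eq h.symm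
          · exact (List.pairwise_cons.mp ha).1 c h
        exact absurd h2 (not_lt.mpr hle)
      simp [hc0]
    · simp [List.count_cons, Ne.symm hc]
  | case5 x xs y ys h1 h2 ih =>
    have hxy : x < y := lt_of_le_of_ne (not_lt.mp h2) h1
    have he : pvMerge (x :: xs) (y :: ys) = x :: pvMerge xs (y :: ys) := by
      simp [pvMerge, h1, h2]
    rw [he, List.count_cons, ih (List.pairwise_cons.mp ha).2 hb]
    by_cases hc : c = x
    · subst hc
      have hc0 : (y :: ys).count c = 0 := by
        rw [List.count_eq_zero]
        intro hmem
        have hle : y ≤ c := by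
          rcases List.mem_cons.mp hmem with h | h
          · exact le_of_eq h.symm
          · exact (List.pairwise_cons.mp hb).1 c h
        exact absurd hxy (not_lt.mpr hle)
      simp [hc0]
    · simp [Ne.symm hc]

-- counts of the A-side extras list built over a nodup key list
theorem count_foldl_replicate (l : List Char) (f : Char → Nat) (c : Char) :
    ∀ init : List Char, l.Nodup →
      (l.foldl (fun acc ch => acc ++ List.replicate (f ch) ch) init).count c
        = init.count c + (if c ∈ l then f c else 0) := by
  induction l with
  | nil => intro init _; simp
  | cons x xs ih =>
    intro init hl
    have hnd := List.nodup_cons.mp hl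
    simp only [List.foldl_cons]
    rw [ih _ hnd.2, List.count_append, List.count_replicate]
    by_cases hc : c = x
    · subst hc
      simp [hnd.1]
    · simp [hc, Ne.symm hc]

theorem count_extras (block word : List Char) (c : Char) :
    ((PySem.Set.ofList block).foldl (fun acc ch =>
        acc ++ List.replicate (((block.count ch : Int) - (word.count ch : Int)).toNat) ch) []).count c
      = block.count c - word.count c := by
  rw [count_foldl_replicate _ _ _ [] (PySem.Set.nodup_ofList block)]
  by_cases hc : c ∈ block
  · simp [PySem.Set.mem_ofList, hc]
  · have h0 : block.count c = 0 := List.count_eq_zero.mpr hc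
    simp [PySem.Set.mem_ofList, hc, h0]

-- ===== VERDICT (by name: the statement is the Claim_ definition above) =====
theorem get_extra_letters_spec : Claim_equal_get_extra_letters := by
  intro block word _
  unfold Spec_get_extra_letters get_extra_letters get_extra_letters_alt
  refine congrArg String.mk ?_
  set bl := block.toList
  set wl := word.toList
  -- both sides are Pairwise ≤ lists with count c = bl.count c - wl.count c; hence equal
  have hA : ∀ c, (PySem.List.sorted
      ((PySem.Dict.counter bl).keys.foldl (fun acc ch =>
        acc ++ List.replicate (((PySem.Dict.counter bl).getD ch 0 - (PySem.Dict.counter wl).getD ch 0).toNat) ch) [])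
      (fun x => x) false).count c = bl.count c - wl.count c := by
    intro c
    rw [(PySem.List.sorted_perm _ _ _).count_eq]
    simp only [PySem.Dict.keys_counter, PySem.Dict.getD_counter]
    exact count_extras bl wl c
  have hB : ∀ c, (pvMerge (PySem.List.sorted bl (fun x => x) false)
      (PySem.List.sorted wl (fun x => x) false)).count c = bl.count c - wl.count c := by
    intro c
    rw [count_pvMerge _ _ (by simpa using PySem.List.sorted_pairwise bl (fun x => x))
      (by simpa using PySem.List.sorted_pairwise wl (fun x => x))]
    rw [(PySem.List.sorted_perm bl _ _).count_eq, (PySem.List.sorted_perm wl _ _).count_eq]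
  have hperm : (PySem.List.sorted
      ((PySem.Dict.counter bl).keys.foldl (fun acc ch =>
        acc ++ List.replicate (((PySem.Dict.counter bl).getD ch 0 - (PySem.Dict.counter wl).getD ch 0).toNat) ch) [])
      (fun x => x) false).Perm (pvMerge (PySem.List.sorted bl (fun x => x) false)
      (PySem.List.sorted wl (fun x => x) false)) := by
    rw [List.perm_iff_count]
    intro c
    rw [hA c, hB c]
  exact List.Perm.eq_of_pairwise (fun a b _ _ h1 h2 => le_antisymm h1 h2)
    (by simpa using PySem.List.sorted_pairwise _ (fun x : Char => x))
    (pvMerge_pairwise _ _ (by simpa using PySem.List.sorted_pairwise bl (fun x => x))) hperm
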